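-- pv_equiv track=rewrite | github.com/rennaMAhcuS/CS433Assignments | A3/Playground/verifier-3D.py | valid_region_centre_3d
-- ===== SOURCE A (Python) =====
-- def valid_region_centre_3d(x, y, z, r):
--     # A valid cross region has the center and all 6 neighbors inside the L1-ball.
--     nbrs = [
--         (x + 1, y, z),
--         (x - 1, y, z),
--         (x, y + 1, z),
--         (x, y - 1, z),
--         (x, y, z + 1),
--         (x, y, z - 1),
--     ]
--     return all(abs(nx) + abs(ny) + abs(nz) <= r for nx, ny, nz in nbrs)
-- ===== SOURCE B (Python) =====
-- def valid_region_centre_3d(x, y, z, r):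
--     # Closed form: the worst of the six neighbors has L1 norm |x|+|y|+|z|+1.
--     return abs(x) + abs(y) + abs(z) + 1 <= r
-- ===== Notes on version B (the rewrite author's own statement) =====
-- stated objective: simpler
-- what changed: Replaced the 6-neighbor list and all(...) scan with one closed-form inequality abs(x)+abs(y)+abs(z)+1 <= r, using max(|c+1|,|c-1|) = |c|+1 per axis.
import Mathlib
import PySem

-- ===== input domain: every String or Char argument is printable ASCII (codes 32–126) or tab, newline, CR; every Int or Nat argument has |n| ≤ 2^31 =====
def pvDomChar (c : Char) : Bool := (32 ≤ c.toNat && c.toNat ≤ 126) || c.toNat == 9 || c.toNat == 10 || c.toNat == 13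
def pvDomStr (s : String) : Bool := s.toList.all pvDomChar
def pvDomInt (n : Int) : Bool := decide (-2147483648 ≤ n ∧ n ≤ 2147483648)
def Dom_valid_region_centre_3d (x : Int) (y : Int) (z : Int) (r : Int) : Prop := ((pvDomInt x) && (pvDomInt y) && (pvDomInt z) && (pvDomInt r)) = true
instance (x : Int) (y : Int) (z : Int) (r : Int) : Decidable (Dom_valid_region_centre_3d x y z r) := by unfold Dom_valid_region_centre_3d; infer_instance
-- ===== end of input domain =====

-- ===== PORT A =====
-- Literal port of A: the 6-neighbor list and an all-scan over it.
def valid_region_centre_3d (x : Int) (y : Int) (z : Int) (r : Int) : Bool :=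
  let nbrs : List (Int × Int × Int) :=
    [(x + 1, y, z), (x - 1, y, z), (x, y + 1, z), (x, y - 1, z), (x, y, z + 1), (x, y, z - 1)]
  nbrs.all (fun t => decide (t.1.natAbs + t.2.1.natAbs + (t.2.2.natAbs : Int) ≤ r))

-- ===== PORT B =====
-- Port of B: single closed-form inequality.
def valid_region_centre_3d_alt (x : Int) (y : Int) (z : Int) (r : Int) : Bool :=
  decide ((x.natAbs + y.natAbs + z.natAbs : Int) + 1 ≤ r)

-- ===== PRECONDITION & SPEC =====
def Spec_valid_region_centre_3d (x : Int) (y : Int) (z : Int) (r : Int) (out : Bool) : Prop := out = valid_region_centre_3d_alt x y z r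
instance (x : Int) (y : Int) (z : Int) (r : Int) (out : Bool) : Decidable (Spec_valid_region_centre_3d x y z r out) := by unfold Spec_valid_region_centre_3d; infer_instance

-- ===== CLAIM (what is proved, stated in full; the proofs are below) =====
def Claim_equal_valid_region_centre_3d : Prop := ∀ (x : Int) (y : Int) (z : Int) (r : Int), Dom_valid_region_centre_3d x y z r → Spec_valid_region_centre_3d x y z r (valid_region_centre_3d x y z r)

-- ===== LEMMAS AND PROOFS =====

-- ===== VERDICT (by name: the statement is the Claim_ definition above) =====
theorem valid_region_centre_3d_spec : Claim_equal_valid_region_centre_3d := by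
  intro x y z r _
  unfold Spec_valid_region_centre_3d valid_region_centre_3d valid_region_centre_3d_alt
  simp only [List.all_cons, List.all_nil, Bool.and_true]
  rw [Bool.eq_iff_iff]
  simp only [Bool.and_eq_true, decide_eq_true_eq]
  omega
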